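-- pv_equiv track=rewrite | github.com/PArellano02/Ebay-Data | ebay_project/ebay_dl.py | parse_item_price
-- ===== SOURCE A (Python) =====
-- def parse_item_price(s):
--     accumulator = ''
--     if '$' in s:
--         for char in s:
--             if char in '1234567890':
--                 accumulator += char
--             if char == ' ':
--                 break
--         return int(accumulator)
-- ===== SOURCE B (Python) =====
-- def parse_item_price(s):
--     if '$' in s:
--         prefix = s.split(' ', 1)[0]
--         return int(''.join(c for c in prefix if c in '1234567890'))
-- ===== Notes on version B (the rewrite author's own statement) =====
-- stated objective: simpler
-- what changed: Replaces the character-by-character accumulate-and-break scan with two sequential passes: isolate the prefix before the first space via split, then filter its digit characters and convert once.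
import Mathlib
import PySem

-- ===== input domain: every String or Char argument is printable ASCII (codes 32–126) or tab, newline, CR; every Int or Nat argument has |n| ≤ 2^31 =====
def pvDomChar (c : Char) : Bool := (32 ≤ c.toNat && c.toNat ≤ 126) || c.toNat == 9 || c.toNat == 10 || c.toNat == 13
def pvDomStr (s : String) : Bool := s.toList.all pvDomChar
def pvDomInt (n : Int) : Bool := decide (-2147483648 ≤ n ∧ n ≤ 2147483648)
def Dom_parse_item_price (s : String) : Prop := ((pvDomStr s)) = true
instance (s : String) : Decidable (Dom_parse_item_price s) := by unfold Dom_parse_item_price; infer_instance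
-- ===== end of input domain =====

-- B: replaces A's accumulate-and-break scan with two passes (take prefix before first space, then filter digits); simpler, same cost.


-- ===== PORT A =====
-- the for-loop with accumulator and break at ' '
def pvLoopA : List Char → List Char → List Char
  | acc, [] => acc
  | acc, c :: rest =>
    let acc' := if c ∈ "1234567890".toList then acc ++ [c] else acc
    if c = ' ' then acc' else pvLoopA acc' rest

def parse_item_price (s : String) : Option Int :=
  if PySem.Str.isIn "$" s then PySem.Int.ofChars? (pvLoopA [] s.toList) else none

-- ===== PORT B =====
def parse_item_price_alt (s : String) : Option Int :=
  if PySem.Str.isIn "$" s then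
    -- s.split(' ', 1)[0] = the characters before the first space
    let pre := s.toList.takeWhile (· ≠ ' ')
    PySem.Int.ofChars? (pre.filter (· ∈ "1234567890".toList))
  else none

-- ===== PRECONDITION & SPEC =====
-- Pre_ excludes exactly the inputs on which Python A raises ValueError: strings containing a dollar sign
-- but no digit before the first space (the accumulator is empty and int raises); B raises there too.
def Pre_parse_item_price (s : String) : Prop :=
  PySem.Str.isIn "$" s = true →
    (s.toList.takeWhile (· ≠ ' ')).any (fun c => decide (c ∈ "1234567890".toList)) = true
instance (s : String) : Decidable (Pre_parse_item_price s) := by unfold Pre_parse_item_price; infer_instance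
def pvWitness_parse_item_price : String := "$12 x"

def Spec_parse_item_price (s : String) (out : Option Int) : Prop := out = parse_item_price_alt s
instance (s : String) (out : Option Int) : Decidable (Spec_parse_item_price s out) := by unfold Spec_parse_item_price; infer_instance

-- ===== CLAIM (what is proved, stated in full; the proofs are below) =====
def Claim_equal_parse_item_price : Prop := ∀ (s : String), Dom_parse_item_price s → Pre_parse_item_price s → Spec_parse_item_price s (parse_item_price s)

-- ===== LEMMAS AND PROOFS =====
theorem pvLoopA_eq (l acc : List Char) :
    pvLoopA acc l = acc ++ (l.takeWhile (· ≠ ' ')).filter (· ∈ "1234567890".toList) := by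
  induction l generalizing acc with
  | nil => simp [pvLoopA]
  | cons c rest ih =>
    by_cases hsp : c = ' '
    · subst hsp
      simp [pvLoopA, List.takeWhile]
    · by_cases hd : c ∈ "1234567890".toList
      · rw [List.takeWhile_cons_of_pos (by simpa using hsp),
            List.filter_cons_of_pos (by simpa using hd)]
        simp only [pvLoopA, if_pos hd, if_neg hsp]
        rw [ih]; simp
      · rw [List.takeWhile_cons_of_pos (by simpa using hsp),
            List.filter_cons_of_neg (by simpa using hd)]
        simp only [pvLoopA, if_neg hd, if_neg hsp]
        exact ih acc

-- ===== VERDICT (by name: the statement is the Claim_ definition above) =====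
theorem parse_item_price_spec : Claim_equal_parse_item_price := by
  intro s _ _
  unfold Spec_parse_item_price parse_item_price parse_item_price_alt
  by_cases h : PySem.Str.isIn "$" s = true <;> simp [pvLoopA_eq]
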